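-- pv_equiv track=rewrite | github.com/anetczuk/ros-diagram-tools | src/rosdiagram/ros/rostopicdata.py | common_topics
-- ===== SOURCE A (Python) =====
-- def common_topics( data1_dict, data2_dict ):
--     data1_topics = set()
--     for topic in data1_dict:
--         data1_topics.add( topic )
--     data2_topics = set()
--     for topic in data2_dict:
--         data2_topics.add( topic )
--     return data1_topics.intersection( data2_topics )
-- ===== SOURCE B (Python) =====
-- def common_topics(data1_dict, data2_dict):
--     counts = {}
--     for topic in data1_dict:
--         counts[topic] = counts.get(topic, 0) + 1
--     for topic in data2_dict:
--         counts[topic] = counts.get(topic, 0) + 1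
--     return {topic for topic, cnt in counts.items() if cnt == 2}
-- ===== Notes on version B (the rewrite author's own statement) =====
-- stated objective: alternative
-- what changed: Replaces build-two-sets-then-library-intersection by occurrence counting: one counter dict tallies each key over both dicts' key sequences (each contributes a key at most once), and the result is the keys counted exactly twice; no set is built and no membership test or intersection is performed.
import Mathlib
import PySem

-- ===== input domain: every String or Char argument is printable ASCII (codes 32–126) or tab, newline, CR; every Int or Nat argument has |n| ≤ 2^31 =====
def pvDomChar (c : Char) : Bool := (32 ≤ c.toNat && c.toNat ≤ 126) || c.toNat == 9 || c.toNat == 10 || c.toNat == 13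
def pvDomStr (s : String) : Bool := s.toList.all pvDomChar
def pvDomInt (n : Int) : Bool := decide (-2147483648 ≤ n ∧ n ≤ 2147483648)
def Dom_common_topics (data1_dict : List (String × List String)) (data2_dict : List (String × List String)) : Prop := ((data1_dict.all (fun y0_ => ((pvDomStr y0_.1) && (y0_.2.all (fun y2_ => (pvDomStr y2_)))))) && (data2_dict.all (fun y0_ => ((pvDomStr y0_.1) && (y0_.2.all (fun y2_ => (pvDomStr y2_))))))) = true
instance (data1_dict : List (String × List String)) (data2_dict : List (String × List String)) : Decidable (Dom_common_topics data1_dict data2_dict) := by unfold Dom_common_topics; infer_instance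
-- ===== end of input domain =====

-- B replaces build-two-sets-then-intersect by occurrence counting over both dicts' key sequences (keys counted twice are common); an alternative algorithm, not claimed faster.


-- ===== PORT A =====
-- iterating a Python dict yields its (distinct) keys; the two loops add each key to a set, then library intersection
def common_topics (data1_dict : List (String × List String)) (data2_dict : List (String × List String)) : List String :=
  PySem.Set.inter                                                        -- data1_topics.intersection( data2_topics )
    (data1_dict.foldl (fun s kv => PySem.Set.add s kv.1) PySem.Set.empty)   -- data1_topics
    (data2_dict.foldl (fun s kv => PySem.Set.add s kv.1) PySem.Set.empty)   -- data2_topics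

-- ===== PORT B =====
-- counts[t] = counts.get(t, 0) + 1 over both dicts' key iterations, then {t for t, c in counts.items() if c == 2}.
-- 'for topic in dX_dict' iterates the dict's DISTINCT keys in first-occurrence order = PySem.Set.ofList (dX.map Prod.fst) (exact for a dict).
def common_topics_alt (data1_dict : List (String × List String)) (data2_dict : List (String × List String)) : List String :=
  PySem.Set.ofList                                                      -- {topic for topic, cnt in counts.items() if cnt == 2}
    ((((PySem.Set.ofList (data2_dict.map Prod.fst)).foldl               -- second counting loop
          (fun d t => d.insert t (d.getD t 0 + 1))
          ((PySem.Set.ofList (data1_dict.map Prod.fst)).foldl           -- first counting loop ('counts' after loop 1)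
            (fun d t => d.insert t (d.getD t 0 + 1))
            (PySem.Dict.empty : PySem.Dict String Int))).items.filter   -- counts.items()
        (fun tc => tc.2 == 2)).map Prod.fst)

-- ===== PRECONDITION & SPEC =====
def Spec_common_topics (data1_dict : List (String × List String)) (data2_dict : List (String × List String)) (out : List String) : Prop := out = common_topics_alt data1_dict data2_dict
instance (data1_dict : List (String × List String)) (data2_dict : List (String × List String)) (out : List String) : Decidable (Spec_common_topics data1_dict data2_dict out) := by unfold Spec_common_topics; infer_instance

-- ===== CLAIM (what is proved, stated in full; the proofs are below) =====
def Claim_equal_common_topics : Prop := ∀ (data1_dict : List (String × List String)) (data2_dict : List (String × List String)), Dom_common_topics data1_dict data2_dict → Spec_common_topics data1_dict data2_dict (common_topics data1_dict data2_dict)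

-- ===== LEMMAS AND PROOFS =====

-- A's key-collecting loop builds set(keys)
theorem foldl_add_fst_eq_ofList (l : List (String × List String)) :
    l.foldl (fun s kv => PySem.Set.add s kv.1) PySem.Set.empty
      = PySem.Set.ofList (l.map Prod.fst) := by
  rw [← PySem.Set.update_map_eq_foldl_add]; rfl

-- B's two counting loops build Counter(k1 ++ k2)
theorem two_count_loops_eq_counter (k1 k2 : List String) :
    k2.foldl (fun d t => d.insert t (d.getD t 0 + 1))
      (k1.foldl (fun d t => d.insert t (d.getD t 0 + 1)) PySem.Dict.empty)
      = PySem.Dict.counter (k1 ++ k2) := by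
  rw [← List.foldl_append, PySem.Dict.foldl_insert_getD_add_one_eq_counter]

-- on two duplicate-free key lists, 'counted twice' is exactly 'in both'
theorem filter_count_two (k1 k2 : List String) (h1 : k1.Nodup) (h2 : k2.Nodup) :
    ((PySem.Set.ofList (k1 ++ k2)).map
        (fun k => (k, ((k1 ++ k2).count k : Int)))
      |>.filter (fun tc => tc.2 == 2)).map Prod.fst
      = k1.filter (fun t => PySem.Set.contains k2 t) := by
  have hof : PySem.Set.ofList (k1 ++ k2)
      = k1 ++ k2.filter (fun y => !(PySem.Set.contains k1 y)) := by
    rw [PySem.Set.ofList_append, PySem.Set.update_eq_append_filter]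
    simp [PySem.Set.ofList_eq_self_of_nodup k1 h1, PySem.Set.ofList_eq_self_of_nodup k2 h2]
  rw [hof, List.map_append, List.filter_append, List.map_append]
  have hA : (((k1.map (fun k => (k, ((k1 ++ k2).count k : Int)))).filter
        (fun tc => tc.2 == 2)).map Prod.fst)
      = k1.filter (fun t => PySem.Set.contains k2 t) := by
    rw [List.filter_map, List.map_map]
    have : k1.filter ((fun tc : String × Int => tc.2 == 2) ∘
          (fun k => (k, ((k1 ++ k2).count k : Int))))
        = k1.filter (fun t => PySem.Set.contains k2 t) := by
      apply List.filter_congr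
      intro t ht
      simp only [Function.comp]
      rw [List.count_append, List.count_eq_one_of_mem h1 ht]
      by_cases hm : t ∈ k2
      · simp [List.count_eq_one_of_mem h2 hm, hm]
      · simp [List.count_eq_zero_of_not_mem hm, hm]
    rw [this, show (Prod.fst ∘ fun k : String => (k, ((k1 ++ k2).count k : Int))) = id from rfl,
      List.map_id]
  have hB : (((((k2.filter (fun y => !(PySem.Set.contains k1 y))).map
        (fun k => (k, ((k1 ++ k2).count k : Int)))).filter
        (fun tc => tc.2 == 2)).map Prod.fst)) = [] := by
    simp only [List.filter_map, List.map_eq_nil_iff, List.filter_eq_nil_iff]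
    intro t ht
    rw [List.mem_filter] at ht
    obtain ⟨ht2, htn⟩ := ht
    have hm1 : t ∉ k1 := by
      intro h
      rw [(PySem.Set.contains_iff k1 t).2 h] at htn
      simp at htn
    simp only [Function.comp]
    rw [List.count_append, List.count_eq_zero_of_not_mem hm1,
      List.count_eq_one_of_mem h2 ht2]
    norm_num
  rw [hA, hB, List.append_nil]

-- ===== VERDICT (by name: the statement is the Claim_ definition above) =====
theorem common_topics_spec : Claim_equal_common_topics := by
  intro d1 d2 _
  show common_topics d1 d2 = common_topics_alt d1 d2
  unfold common_topics common_topics_alt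
  rw [foldl_add_fst_eq_ofList, foldl_add_fst_eq_ofList, two_count_loops_eq_counter,
    PySem.Dict.items_counter, filter_count_two _ _ (PySem.Set.nodup_ofList _) (PySem.Set.nodup_ofList _)]
  rw [PySem.Set.ofList_eq_self_of_nodup _
      ((PySem.Set.nodup_ofList (d1.map Prod.fst)).filter _)]
  unfold PySem.Set.inter
  apply List.filter_congr
  intro a _
  simp [PySem.Set.mem_ofList]
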